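-- pv_equiv track=rewrite | github.com/seenuvasan1947/own_solidity | rules/security/WeakPRNGDetector.py | _is_simple_time_check
-- ===== SOURCE A (Python) =====
-- def _is_simple_time_check(text):
--     """Check if this is just a simple time comparison (not randomness)"""
--     # Simple time checks usually have comparison operators without modulo
--     time_check_patterns = [
--         'require(block.timestamp>', 'require(block.timestamp<',
--         'require(now>', 'require(now<',
--         'if(block.timestamp>', 'if(block.timestamp<',
--         'if(now>', 'if(now<',
--         'block.timestamp+', 'block.timestamp-',
--         'now+', 'now-'
--     ]
--
--     # Remove spaces for pattern matching
--     text_no_space = text.replace(' ', '')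
--
--     return any(pattern.replace(' ', '') in text_no_space for pattern in time_check_patterns)
-- ===== SOURCE B (Python) =====
-- def _hit(kw, t, i):
--     """Does a match start at position i: keyword kw, then an operator, in the right context?"""
--     if not t.startswith(kw, i):
--         return False
--     j = i + len(kw)
--     if t.startswith('+', j) or t.startswith('-', j):
--         return True
--     return (t.startswith('<', j) or t.startswith('>', j)) and \
--         (t.endswith('require(', 0, i) or t.endswith('if(', 0, i))
--
--
-- def _is_simple_time_check(text):
--     """Check if this is just a simple time comparison (not randomness)"""
--     t = text.replace(' ', '')
--     return any(_hit('block.timestamp', t, i) or _hit('now', t, i)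
--                for i in range(len(t)))
-- ===== Notes on version B (the rewrite author's own statement) =====
-- stated objective: alternative
-- what changed: Instead of testing each of the twelve fixed patterns for substring containment independently, B makes one left-to-right scan of the space-stripped text, and at each position looks for one of the two keywords ('block.timestamp'/'now'), classifying the operator character after it and, for comparisons, the context ('require('/'if(') before it.
import Mathlib
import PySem

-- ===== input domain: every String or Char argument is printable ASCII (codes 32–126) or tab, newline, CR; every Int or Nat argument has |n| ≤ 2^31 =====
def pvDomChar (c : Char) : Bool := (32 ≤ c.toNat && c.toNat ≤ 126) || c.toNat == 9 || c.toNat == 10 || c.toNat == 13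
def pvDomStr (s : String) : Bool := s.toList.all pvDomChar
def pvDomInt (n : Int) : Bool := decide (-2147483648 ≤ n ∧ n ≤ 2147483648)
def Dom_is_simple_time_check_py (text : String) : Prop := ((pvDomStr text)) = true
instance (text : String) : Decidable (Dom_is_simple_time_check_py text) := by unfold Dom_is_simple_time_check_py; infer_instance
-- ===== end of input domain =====

-- B replaces A's twelve independent substring scans by one left-to-right scan of the space-stripped
-- text that looks for the two keywords and classifies the character after and the context before them
-- (objective: alternative).

-- ===== PORT A =====
def pvTimePats : List (List Char) :=
  ["require(block.timestamp>".toList, "require(block.timestamp<".toList,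
   "require(now>".toList, "require(now<".toList,
   "if(block.timestamp>".toList, "if(block.timestamp<".toList,
   "if(now>".toList, "if(now<".toList,
   "block.timestamp+".toList, "block.timestamp-".toList,
   "now+".toList, "now-".toList]

def is_simple_time_check_py (text : String) : Bool :=
  let text_no_space := PySem.Chars.replace text.toList [' '] []
  pvTimePats.any (fun p => PySem.Chars.isIn (PySem.Chars.replace p [' '] []) text_no_space)

-- ===== PORT B =====
-- _hit(kw, t, i), i a nonnegative in-range position: Python's t.startswith(p, j) with 0 <= j is
-- startswith on t.drop j, t.endswith(p, 0, i) is endswith on t.take i (exact there); j = i + len(kw)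
def pvHitAt (kw t : List Char) (i : Nat) : Bool :=
  if PySem.Chars.startswith (t.drop i) kw then
    if PySem.Chars.startswith (t.drop (i + kw.length)) ['+'] || PySem.Chars.startswith (t.drop (i + kw.length)) ['-'] then true
    else (PySem.Chars.startswith (t.drop (i + kw.length)) ['<'] || PySem.Chars.startswith (t.drop (i + kw.length)) ['>'])
         && (PySem.Chars.endswith (t.take i) "require(".toList || PySem.Chars.endswith (t.take i) "if(".toList)
  else false

-- any(... for i in range(len(t))); i comes from range so 0 <= i, and .toNat is exact
def is_simple_time_check_py_alt (text : String) : Bool :=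
  let t := PySem.Chars.replace text.toList [' '] []
  (PySem.List.pyRange 0 t.length 1).any (fun i =>
    pvHitAt "block.timestamp".toList t i.toNat || pvHitAt "now".toList t i.toNat)

-- ===== PRECONDITION & SPEC =====
def Spec_is_simple_time_check_py (text : String) (out : Bool) : Prop := out = is_simple_time_check_py_alt text
instance (text : String) (out : Bool) : Decidable (Spec_is_simple_time_check_py text out) := by unfold Spec_is_simple_time_check_py; infer_instance

-- ===== CLAIM (what is proved, stated in full; the proofs are below) =====
def Claim_equal_is_simple_time_check_py : Prop := ∀ (text : String), Dom_is_simple_time_check_py text → Spec_is_simple_time_check_py text (is_simple_time_check_py text)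

-- ===== LEMMAS AND PROOFS =====

-- pvHit kw rest seen: pvHitAt with the text split explicitly into seen ++ rest (proof-side view)
def pvHit (kw rest seen : List Char) : Bool :=
  if PySem.Chars.startswith rest kw then
    if PySem.Chars.startswith (rest.drop kw.length) ['+'] || PySem.Chars.startswith (rest.drop kw.length) ['-'] then true
    else (PySem.Chars.startswith (rest.drop kw.length) ['<'] || PySem.Chars.startswith (rest.drop kw.length) ['>'])
         && (PySem.Chars.endswith seen "require(".toList || PySem.Chars.endswith seen "if(".toList)
  else false

lemma pvHitAt_eq (kw t : List Char) (i : Nat) :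
    pvHitAt kw t i = pvHit kw (t.drop i) (t.take i) := by
  simp [pvHitAt, pvHit, List.drop_drop]

-- "B found a match starting right at the head of suf, with context ctx before it"
def pvCheck (suf ctx : List Char) : Bool :=
  pvHit "block.timestamp".toList suf ctx || pvHit "now".toList suf ctx

lemma pvHit_nil (kw seen : List Char) (h : kw ≠ []) : pvHit kw [] seen = false := by
  simp [pvHit, PySem.Chars.startswith_iff, List.prefix_nil, h]

lemma pvHit_build_pm (kw u v : List Char) (op : Char) (hop : op = '+' ∨ op = '-') :
    pvHit kw (kw ++ op :: v) u = true := by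
  have h1 : PySem.Chars.startswith (kw ++ op :: v) kw = true :=
    (PySem.Chars.startswith_iff _ _).mpr (List.prefix_append _ _)
  have h2 : PySem.Chars.startswith (op :: v) [op] = true :=
    (PySem.Chars.startswith_iff _ _).mpr ⟨v, rfl⟩
  rcases hop with h | h <;> subst h <;> simp [pvHit, h1, h2]

lemma pvHit_build_cmp (kw ctx u v : List Char) (op : Char)
    (hop : op = '<' ∨ op = '>')
    (hctx : ctx = "require(".toList ∨ ctx = "if(".toList) :
    pvHit kw (kw ++ op :: v) (u ++ ctx) = true := by
  have h1 : PySem.Chars.startswith (kw ++ op :: v) kw = true :=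
    (PySem.Chars.startswith_iff _ _).mpr (List.prefix_append _ _)
  have h2 : PySem.Chars.startswith (op :: v) [op] = true :=
    (PySem.Chars.startswith_iff _ _).mpr ⟨v, rfl⟩
  rcases hop with h | h <;> subst h <;> rcases hctx with h' | h' <;> subst h' <;>
    simp [pvHit, h1, h2, PySem.Chars.startswith_iff, PySem.Chars.endswith_iff,
      List.suffix_append, List.IsPrefix]

lemma pvBuild_cmp (kw ctx u v : List Char) (op : Char)
    (hkw : kw = "block.timestamp".toList ∨ kw = "now".toList)
    (hop : op = '<' ∨ op = '>')
    (hctx : ctx = "require(".toList ∨ ctx = "if(".toList) :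
    ∃ pre suf, u ++ (ctx ++ kw ++ [op]) ++ v = pre ++ suf ∧ pvCheck suf pre = true := by
  refine ⟨u ++ ctx, kw ++ op :: v, by simp, ?_⟩
  rcases hkw with hk | hk <;> subst hk
  · exact Bool.or_eq_true_iff.mpr (Or.inl (pvHit_build_cmp _ _ _ _ _ hop hctx))
  · exact Bool.or_eq_true_iff.mpr (Or.inr (pvHit_build_cmp _ _ _ _ _ hop hctx))

lemma pvBuild_pm (kw u v : List Char) (op : Char)
    (hkw : kw = "block.timestamp".toList ∨ kw = "now".toList)
    (hop : op = '+' ∨ op = '-') :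
    ∃ pre suf, u ++ (kw ++ [op]) ++ v = pre ++ suf ∧ pvCheck suf pre = true := by
  refine ⟨u, kw ++ op :: v, by simp, ?_⟩
  rcases hkw with hk | hk <;> subst hk
  · exact Bool.or_eq_true_iff.mpr (Or.inl (pvHit_build_pm _ _ _ _ hop))
  · exact Bool.or_eq_true_iff.mpr (Or.inr (pvHit_build_pm _ _ _ _ hop))

lemma pvHit_forward (kw suf pre : List Char)
    (hkw : kw = "block.timestamp".toList ∨ kw = "now".toList)
    (h : pvHit kw suf pre = true) :
    ∃ p ∈ pvTimePats, p <:+: (pre ++ suf) := by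
  rw [pvHit] at h
  split_ifs at h with h1 h2
  · rcases (PySem.Chars.startswith_iff _ _).mp h1 with ⟨r, hr⟩
    have hdrop : suf.drop kw.length = r := by rw [← hr]; exact List.drop_left
    rw [hdrop] at h2
    rcases Bool.or_eq_true_iff.mp h2 with hop | hop <;>
      rcases (PySem.Chars.startswith_iff _ _).mp hop with ⟨r2, hr2⟩
    · refine ⟨kw ++ ['+'], ?_, ⟨pre, r2, ?_⟩⟩
      · rcases hkw with hk | hk <;> subst hk <;> decide
      · rw [← hr, ← hr2]; simp
    · refine ⟨kw ++ ['-'], ?_, ⟨pre, r2, ?_⟩⟩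
      · rcases hkw with hk | hk <;> subst hk <;> decide
      · rw [← hr, ← hr2]; simp
  · rcases (PySem.Chars.startswith_iff _ _).mp h1 with ⟨r, hr⟩
    have hdrop : suf.drop kw.length = r := by rw [← hr]; exact List.drop_left
    rw [hdrop] at h
    rcases Bool.and_eq_true_iff.mp h with ⟨hcmp, hctx⟩
    rcases Bool.or_eq_true_iff.mp hctx with hc | hc <;>
      rcases (PySem.Chars.endswith_iff _ _).mp hc with ⟨u, hu⟩ <;>
      rcases Bool.or_eq_true_iff.mp hcmp with hop | hop <;>
      rcases (PySem.Chars.startswith_iff _ _).mp hop with ⟨r2, hr2⟩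
    · refine ⟨"require(".toList ++ kw ++ ['<'], ?_, ⟨u, r2, ?_⟩⟩
      · rcases hkw with hk | hk <;> subst hk <;> decide
      · rw [← hu, ← hr, ← hr2]; simp
    · refine ⟨"require(".toList ++ kw ++ ['>'], ?_, ⟨u, r2, ?_⟩⟩
      · rcases hkw with hk | hk <;> subst hk <;> decide
      · rw [← hu, ← hr, ← hr2]; simp
    · refine ⟨"if(".toList ++ kw ++ ['<'], ?_, ⟨u, r2, ?_⟩⟩
      · rcases hkw with hk | hk <;> subst hk <;> decide
      · rw [← hu, ← hr, ← hr2]; simp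
    · refine ⟨"if(".toList ++ kw ++ ['>'], ?_, ⟨u, r2, ?_⟩⟩
      · rcases hkw with hk | hk <;> subst hk <;> decide
      · rw [← hu, ← hr, ← hr2]; simp

lemma pvAlt_iff (t : List Char) :
    (((PySem.List.pyRange 0 t.length 1).any (fun i =>
        pvHitAt "block.timestamp".toList t i.toNat || pvHitAt "now".toList t i.toNat)) = true)
      ↔ ∃ pre suf, t = pre ++ suf ∧ pvCheck suf pre = true := by
  rw [List.any_eq_true]
  constructor
  · rintro ⟨i, hi, hhit⟩
    rcases (PySem.List.mem_pyRange_one).mp hi with ⟨h0, hn⟩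
    refine ⟨t.take i.toNat, t.drop i.toNat, (List.take_append_drop _ _).symm, ?_⟩
    rw [pvCheck, ← pvHitAt_eq, ← pvHitAt_eq]
    exact hhit
  · rintro ⟨pre, suf, rfl, hc⟩
    cases suf with
    | nil =>
      rw [pvCheck, pvHit_nil _ _ (by decide), pvHit_nil _ _ (by decide)] at hc
      simp at hc
    | cons c suf' =>
      refine ⟨(pre.length : Int), (PySem.List.mem_pyRange_one).mpr ⟨by positivity, by simp⟩, ?_⟩
      rw [Int.toNat_natCast, pvHitAt_eq, pvHitAt_eq, List.take_left, List.drop_left]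
      exact hc

lemma pvCheck_exists_iff (t : List Char) :
    (∃ pre suf, t = pre ++ suf ∧ pvCheck suf pre = true) ↔ ∃ p ∈ pvTimePats, p <:+: t := by
  constructor
  · rintro ⟨pre, suf, rfl, hc⟩
    rcases Bool.or_eq_true_iff.mp hc with h | h
    · exact pvHit_forward _ _ _ (Or.inl rfl) h
    · exact pvHit_forward _ _ _ (Or.inr rfl) h
  · rintro ⟨p, hp, hinf⟩
    obtain ⟨u, v, rfl⟩ : ∃ u v, t = u ++ p ++ v := by
      rcases hinf with ⟨u, v, huv⟩; exact ⟨u, v, huv.symm⟩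
    simp only [pvTimePats, List.mem_cons, List.not_mem_nil, or_false] at hp
    rcases hp with h|h|h|h|h|h|h|h|h|h|h|h <;> subst h
    · rw [show "require(block.timestamp>".toList = "require(".toList ++ "block.timestamp".toList ++ ['>'] by decide]
      exact pvBuild_cmp _ _ _ _ _ (Or.inl rfl) (Or.inr rfl) (Or.inl rfl)
    · rw [show "require(block.timestamp<".toList = "require(".toList ++ "block.timestamp".toList ++ ['<'] by decide]
      exact pvBuild_cmp _ _ _ _ _ (Or.inl rfl) (Or.inl rfl) (Or.inl rfl)
    · rw [show "require(now>".toList = "require(".toList ++ "now".toList ++ ['>'] by decide]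
      exact pvBuild_cmp _ _ _ _ _ (Or.inr rfl) (Or.inr rfl) (Or.inl rfl)
    · rw [show "require(now<".toList = "require(".toList ++ "now".toList ++ ['<'] by decide]
      exact pvBuild_cmp _ _ _ _ _ (Or.inr rfl) (Or.inl rfl) (Or.inl rfl)
    · rw [show "if(block.timestamp>".toList = "if(".toList ++ "block.timestamp".toList ++ ['>'] by decide]
      exact pvBuild_cmp _ _ _ _ _ (Or.inl rfl) (Or.inr rfl) (Or.inr rfl)
    · rw [show "if(block.timestamp<".toList = "if(".toList ++ "block.timestamp".toList ++ ['<'] by decide]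
      exact pvBuild_cmp _ _ _ _ _ (Or.inl rfl) (Or.inl rfl) (Or.inr rfl)
    · rw [show "if(now>".toList = "if(".toList ++ "now".toList ++ ['>'] by decide]
      exact pvBuild_cmp _ _ _ _ _ (Or.inr rfl) (Or.inr rfl) (Or.inr rfl)
    · rw [show "if(now<".toList = "if(".toList ++ "now".toList ++ ['<'] by decide]
      exact pvBuild_cmp _ _ _ _ _ (Or.inr rfl) (Or.inl rfl) (Or.inr rfl)
    · rw [show "block.timestamp+".toList = "block.timestamp".toList ++ ['+'] by decide]
      exact pvBuild_pm _ _ _ _ (Or.inl rfl) (Or.inl rfl)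
    · rw [show "block.timestamp-".toList = "block.timestamp".toList ++ ['-'] by decide]
      exact pvBuild_pm _ _ _ _ (Or.inl rfl) (Or.inr rfl)
    · rw [show "now+".toList = "now".toList ++ ['+'] by decide]
      exact pvBuild_pm _ _ _ _ (Or.inr rfl) (Or.inl rfl)
    · rw [show "now-".toList = "now".toList ++ ['-'] by decide]
      exact pvBuild_pm _ _ _ _ (Or.inr rfl) (Or.inr rfl)

-- the patterns contain no space, so A's pattern.replace(' ', '') is the identity on them
lemma pvReplace_pat (p : List Char) (hp : p ∈ pvTimePats) :
    PySem.Chars.replace p [' '] [] = p := by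
  fin_cases hp <;> decide

lemma pvA_iff (t : List Char) :
    ((pvTimePats.any (fun p => PySem.Chars.isIn (PySem.Chars.replace p [' '] []) t)) = true)
      ↔ ∃ p ∈ pvTimePats, p <:+: t := by
  rw [List.any_eq_true]
  constructor
  · rintro ⟨p, hp, hi⟩
    exact ⟨p, hp, (PySem.Chars.isIn_iff_infix _ _).mp (by rwa [pvReplace_pat p hp] at hi)⟩
  · rintro ⟨p, hp, hi⟩
    exact ⟨p, hp, by rw [pvReplace_pat p hp]; exact (PySem.Chars.isIn_iff_infix _ _).mpr hi⟩

-- ===== VERDICT (by name: the statement is the Claim_ definition above) =====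
theorem is_simple_time_check_py_spec : Claim_equal_is_simple_time_check_py := by
  intro text _
  unfold Spec_is_simple_time_check_py is_simple_time_check_py is_simple_time_check_py_alt
  exact Bool.eq_iff_iff.mpr
    ((pvA_iff (PySem.Chars.replace text.toList [' '] [])).trans
      ((pvAlt_iff (PySem.Chars.replace text.toList [' '] [])).trans
        (pvCheck_exists_iff (PySem.Chars.replace text.toList [' '] []))).symm)
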